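-- pv_equiv track=rewrite | github.com/christian-jurado/codewars | TheObservedPIN.py | get_pins
-- ===== SOURCE A (Python) =====
-- def get_pins(observed):
--
-- #Create a dictionary with all the possibles adjacent digits (list), including the observed number
-- #Create a list where would go the result
-- #If is 1 digit return the list of the number
-- #If is more than 1 digit, have to copy the first list, the iterate the second list (combine) with the first in all possibe variation
-- #Repeat previous step
-- #Return the result
--     adjacent_digits = {
--         '0': ['0', '8'],
--         '1': ['1', '2', '4'],
--         '2': ['1', '2', '3', '5'],
--         '3': ['2', '3', '6'],
--         '4': ['1', '4', '5', '7'],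
--         '5': ['2', '4', '5', '6', '8'],
--         '6': ['3', '5', '6', '9'],
--         '7': ['4', '7', '8'],
--         '8': ['5', '7', '8', '9', '0'],
--         '9': ['6', '8', '9']
--     }
--
--     variations = ['']
--
--     for digit in observed:
--         new_variations = []  # Create a new list to store variations for the current digit
--         for prefix in variations:  # Iterate over existing variations
--             for suffix in adjacent_digits[digit]:  # Iterate over adjacent digits for the current digit
--                 new_variation = prefix + suffix  # Concatenate prefix and suffix to form a new variation
--                 new_variations.append(new_variation)  # Add the new variation to the list
--         variations = new_variations  # Update the list of variations with variations for the current digit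
--
--     return variations
-- ===== SOURCE B (Python) =====
-- def get_pins(observed):
--     adjacent = {
--         '0': ['0', '8'],
--         '1': ['1', '2', '4'],
--         '2': ['1', '2', '3', '5'],
--         '3': ['2', '3', '6'],
--         '4': ['1', '4', '5', '7'],
--         '5': ['2', '4', '5', '6', '8'],
--         '6': ['3', '5', '6', '9'],
--         '7': ['4', '7', '8'],
--         '8': ['5', '7', '8', '9', '0'],
--         '9': ['6', '8', '9']
--     }
--
--     def solve(s):
--         # divide and conquer: pins of s = cross-concatenation of pins of the halves
--         if len(s) == 0:
--             return ['']
--         if len(s) == 1: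
--             return adjacent[s]
--         mid = len(s) // 2
--         left = solve(s[:mid])
--         right = solve(s[mid:])
--         return [l + r for l in left for r in right]
--
--     return solve(observed)
-- ===== Notes on version B (the rewrite author's own statement) =====
-- stated objective: alternative
-- what changed: Replaced A's linear prefix-extension accumulator loop (rebuild the whole variation list once per digit) by a divide-and-conquer recursion that splits the observed string in half, solves each half independently, and cross-concatenates the two half-results; order is preserved because positionwise enumeration order composes under concatenation.
import Mathlib
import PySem

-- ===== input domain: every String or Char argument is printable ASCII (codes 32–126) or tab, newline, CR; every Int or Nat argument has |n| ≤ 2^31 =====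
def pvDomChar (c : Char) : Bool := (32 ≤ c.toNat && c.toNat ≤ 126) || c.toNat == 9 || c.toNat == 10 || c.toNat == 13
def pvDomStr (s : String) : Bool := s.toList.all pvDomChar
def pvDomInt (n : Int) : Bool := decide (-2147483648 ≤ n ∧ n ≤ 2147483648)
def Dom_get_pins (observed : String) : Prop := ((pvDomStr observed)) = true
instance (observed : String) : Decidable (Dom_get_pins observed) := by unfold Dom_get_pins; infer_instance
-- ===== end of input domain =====

-- B replaces A's linear prefix-extension accumulator loop by a divide-and-conquer
-- recursion (split the string in half, solve the halves, cross-concatenate) — objective: alternative.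

-- ===== PORT A =====
-- the adjacency dict of A; lookup outside '0'..'9' raises KeyError in Python (excluded by Pre_)
def pvAdj (c : Char) : List String :=
  if c = '0' then ["0", "8"]
  else if c = '1' then ["1", "2", "4"]
  else if c = '2' then ["1", "2", "3", "5"]
  else if c = '3' then ["2", "3", "6"]
  else if c = '4' then ["1", "4", "5", "7"]
  else if c = '5' then ["2", "4", "5", "6", "8"]
  else if c = '6' then ["3", "5", "6", "9"]
  else if c = '7' then ["4", "7", "8"]
  else if c = '8' then ["5", "7", "8", "9", "0"]
  else if c = '9' then ["6", "8", "9"]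
  else []

def get_pins (observed : String) : List String :=
  observed.toList.foldl
    (fun variations digit =>
      variations.foldl
        (fun new_variations prefx =>
          (pvAdj digit).foldl
            (fun nv suffx => nv ++ [prefx ++ suffx]) new_variations)
        [])
    [""]

-- ===== PORT B =====
-- Source B's adjacency dict as an association list; lookup outside '0'..'9' is the
-- KeyError case (excluded by Pre_), defaulted to [] here
def pvAdjDict : PySem.Dict Char (List String) := PySem.Dict.ofList
  [('0', ["0", "8"]), ('1', ["1", "2", "4"]), ('2', ["1", "2", "3", "5"]),
   ('3', ["2", "3", "6"]), ('4', ["1", "4", "5", "7"]), ('5', ["2", "4", "5", "6", "8"]),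
   ('6', ["3", "5", "6", "9"]), ('7', ["4", "7", "8"]), ('8', ["5", "7", "8", "9", "0"]),
   ('9', ["6", "8", "9"])]

def pvAdjB (c : Char) : List String := pvAdjDict.getD c []

-- divide and conquer: pins of s = cross-concatenation of pins of the two halves
def pvSolve : List Char → List String
  | [] => [""]
  | [c] => pvAdjB c
  | s@(_ :: _ :: _) =>
    let mid := s.length / 2
    (pvSolve (s.take mid)).flatMap (fun l => (pvSolve (s.drop mid)).map (fun r => l ++ r))
termination_by s => s.length
decreasing_by
  all_goals subst_vars; simp [List.length_take, List.length_drop, namedPattern]; omega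

def get_pins_alt (observed : String) : List String := pvSolve observed.toList

-- ===== PRECONDITION & SPEC =====
-- Pre_ excludes strings containing a non-digit character: there A's dict lookup raises KeyError
def Pre_get_pins (observed : String) : Prop :=
  (observed.toList.all Char.isDigit) = true
instance (observed : String) : Decidable (Pre_get_pins observed) := by unfold Pre_get_pins; infer_instance
def pvWitness_get_pins : String := "13"

def Spec_get_pins (observed : String) (out : List String) : Prop := out = get_pins_alt observed
instance (observed : String) (out : List String) : Decidable (Spec_get_pins observed out) := by unfold Spec_get_pins; infer_instance

-- ===== CLAIM (what is proved, stated in full; the proofs are below) =====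
def Claim_equal_get_pins : Prop := ∀ (observed : String), Dom_get_pins observed → Pre_get_pins observed → Spec_get_pins observed (get_pins observed)

-- ===== LEMMAS AND PROOFS =====

-- head recursion characterising the set of pins; both ports are reduced to it
def pvPins : List Char → List String
  | [] => [""]
  | d :: ds => (pvAdjB d).flatMap (fun a => (pvPins ds).map (fun t => a ++ t))

theorem pv_inner1 (p : String) (adj : List String) (a : List String) :
    adj.foldl (fun nv s => nv ++ [p ++ s]) a = a ++ adj.map (fun s => p ++ s) := by
  induction adj generalizing a with
  | nil => simp
  | cons s adj ih => simp [ih]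

-- the two adjacency tables are definitionally the same function
theorem pvAdjDict_mk : pvAdjDict = PySem.Dict.mk
  [('0', ["0", "8"]), ('1', ["1", "2", "4"]), ('2', ["1", "2", "3", "5"]),
   ('3', ["2", "3", "6"]), ('4', ["1", "4", "5", "7"]), ('5', ["2", "4", "5", "6", "8"]),
   ('6', ["3", "5", "6", "9"]), ('7', ["4", "7", "8"]), ('8', ["5", "7", "8", "9", "0"]),
   ('9', ["6", "8", "9"])] := by decide

theorem pvAdjB_eq (c : Char) : pvAdjB c = pvAdj c := by
  by_cases h0 : c = '0' <;> by_cases h1 : c = '1' <;> by_cases h2 : c = '2' <;>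
    by_cases h3 : c = '3' <;> by_cases h4 : c = '4' <;> by_cases h5 : c = '5' <;>
    by_cases h6 : c = '6' <;> by_cases h7 : c = '7' <;> by_cases h8 : c = '8' <;>
    by_cases h9 : c = '9' <;> subst_vars <;>
    first
      | decide
      | (simp only [pvAdjB, pvAdjDict_mk, pvAdj, PySem.Dict.getD, PySem.Dict.get?_mk_cons,
           beq_iff_eq]
         rw [if_neg (fun h => h0 h.symm), if_neg (fun h => h1 h.symm),
             if_neg (fun h => h2 h.symm), if_neg (fun h => h3 h.symm),
             if_neg (fun h => h4 h.symm), if_neg (fun h => h5 h.symm),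
             if_neg (fun h => h6 h.symm), if_neg (fun h => h7 h.symm),
             if_neg (fun h => h8 h.symm), if_neg (fun h => h9 h.symm),
             if_neg h0, if_neg h1, if_neg h2, if_neg h3, if_neg h4,
             if_neg h5, if_neg h6, if_neg h7, if_neg h8, if_neg h9]
         simp [PySem.Dict.get?])

-- A's inner two loops produce the flatMap of appended suffixes
theorem pv_inner (vs : List String) (adj : List String) (acc : List String) :
    vs.foldl (fun nv p => adj.foldl (fun nv s => nv ++ [p ++ s]) nv) acc
      = acc ++ vs.flatMap (fun p => adj.map (fun s => p ++ s)) := by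
  induction vs generalizing acc with
  | nil => simp
  | cons p vs ih =>
    rw [List.foldl_cons, pv_inner1, ih, List.flatMap_cons]
    simp

-- A's outer loop computes prefixes appended to the pins of the remaining digits
theorem pv_outer (ds : List Char) (vs : List String) :
    ds.foldl
      (fun variations digit =>
        variations.foldl
          (fun nv p => (pvAdj digit).foldl (fun nv s => nv ++ [p ++ s]) nv) [])
      vs
      = vs.flatMap (fun p => (pvPins ds).map (fun t => p ++ t)) := by
  induction ds generalizing vs with
  | nil => simp [pvPins]
  | cons d ds ih =>
    rw [List.foldl_cons, pv_inner, List.nil_append, ih]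
    simp only [pvPins, pvAdjB_eq]
    rw [List.flatMap_assoc]
    congr 1; funext p
    simp [List.flatMap_map, Function.comp_def, List.map_flatMap, String.append_assoc]

-- pvPins is a homomorphism from concatenation to cross-concatenation
theorem pvPins_append (xs ys : List Char) :
    pvPins (xs ++ ys)
      = (pvPins xs).flatMap (fun l => (pvPins ys).map (fun r => l ++ r)) := by
  induction xs with
  | nil => simp [pvPins]
  | cons d xs ih =>
    simp only [List.cons_append, pvPins, ih]
    rw [List.flatMap_assoc]
    congr 1; funext a
    simp [List.flatMap_map, Function.comp_def, List.map_flatMap, String.append_assoc]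

-- B's divide-and-conquer recursion computes pvPins
theorem pvSolve_eq (s : List Char) : pvSolve s = pvPins s := by
  fun_induction pvSolve s
  case case1 => simp [pvPins]
  case case2 => simp [pvPins]
  case case3 =>
    rename_i ih1 ih2
    rw [ih1, ih2, ← pvPins_append, List.take_append_drop]

-- ===== VERDICT (by name: the statement is the Claim_ definition above) =====
theorem get_pins_spec : Claim_equal_get_pins := by
  intro observed _ _
  unfold Spec_get_pins get_pins get_pins_alt
  rw [pv_outer, pvSolve_eq]
  simp
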